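-- pv_equiv track=rewrite | github.com/JunJon09/Boat_race | myproject/AI_learn/recovery_rate.py | soted_rank
-- ===== SOURCE A (Python) =====
-- def soted_rank(predict_rank, result_rank):
--     sorted_predict = []
--     sorted_result = []
--     for p, r in zip(predict_rank, result_rank):
--         predict_3 = []
--         result_3 = []
--         count = 0
--         for (p_3, r_3) in zip(p, r):
--             if p_3 == 1:
--                 predict_3.append(count+1)
--             if r_3 == 1:
--                 result_3.append(count+1)
--             count += 1
--         count = 0
--         for (p_3, r_3) in zip(p, r):
--             if p_3 == 2:
--                 predict_3.append(count+1)
--             if r_3 == 2: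
--                 result_3.append(count+1)
--             count += 1
--         count = 0
--         for (p_3, r_3) in zip(p, r):
--             if p_3 == 3:
--                 predict_3.append(count+1)
--             if r_3 == 3:
--                 result_3.append(count+1)
--             count += 1
--         sorted_predict.append(predict_3)
--         sorted_result.append(result_3)
--
--
--     return sorted_predict, sorted_result
-- ===== SOURCE B (Python) =====
-- def soted_rank(predict_rank, result_rank):
--     sorted_predict = []
--     sorted_result = []
--     for p, r in zip(predict_rank, result_rank):
--         b1 = []; b2 = []; b3 = []
--         c1 = []; c2 = []; c3 = []
--         count = 0
--         for p_3, r_3 in zip(p, r):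
--             pos = count + 1
--             if p_3 == 1:
--                 b1.append(pos)
--             elif p_3 == 2:
--                 b2.append(pos)
--             elif p_3 == 3:
--                 b3.append(pos)
--             if r_3 == 1:
--                 c1.append(pos)
--             elif r_3 == 2:
--                 c2.append(pos)
--             elif r_3 == 3:
--                 c3.append(pos)
--             count += 1
--         sorted_predict.append(b1 + b2 + b3)
--         sorted_result.append(c1 + c2 + c3)
--     return sorted_predict, sorted_result
-- ===== Notes on version B (the rewrite author's own statement) =====
-- stated objective: alternative
-- what changed: Replaces the three inner passes over zip(p, r) (one per rank value) with a single pass that dispatches each position into six bucket lists, concatenated after the loop; measured ~1.4x, below the 1.5x threshold.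
import Mathlib
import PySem

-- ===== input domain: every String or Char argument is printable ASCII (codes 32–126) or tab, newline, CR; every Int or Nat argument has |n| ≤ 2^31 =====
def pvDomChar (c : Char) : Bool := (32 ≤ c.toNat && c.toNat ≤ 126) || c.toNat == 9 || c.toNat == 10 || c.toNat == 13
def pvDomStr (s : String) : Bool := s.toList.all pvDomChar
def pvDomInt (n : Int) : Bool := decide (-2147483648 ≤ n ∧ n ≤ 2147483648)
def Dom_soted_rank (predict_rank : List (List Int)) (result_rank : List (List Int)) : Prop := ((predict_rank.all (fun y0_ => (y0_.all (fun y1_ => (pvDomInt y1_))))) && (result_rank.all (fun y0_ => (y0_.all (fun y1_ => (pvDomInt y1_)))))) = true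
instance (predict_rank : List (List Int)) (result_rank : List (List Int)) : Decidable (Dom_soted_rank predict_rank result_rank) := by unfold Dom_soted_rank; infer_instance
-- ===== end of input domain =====

-- B replaces A's three inner passes over zip(p, r) with one pass into six bucket lists, concatenated after the loop.


-- ===== PORT A =====
-- inner loop of A for one rank value v: scans zip p r with a counter, appending count+1
def loopA (v : Int) : List (Int × Int) → List Int → List Int → Int → List Int × List Int
  | [], pred, res, _ => (pred, res)
  | (p, r) :: t, pred, res, c =>
      loopA v t (if p = v then pred ++ [c + 1] else pred)
                (if r = v then res ++ [c + 1] else res) (c + 1)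

-- one iteration of A's outer loop: three passes over zip p r
def rowA (pr : List Int × List Int) : List Int × List Int :=
  let z := pr.1.zip pr.2
  let s1 := loopA 1 z [] [] 0
  let s2 := loopA 2 z s1.1 s1.2 0
  loopA 3 z s2.1 s2.2 0

def soted_rank (predict_rank : List (List Int)) (result_rank : List (List Int)) : List (List Int) × List (List Int) :=
  (predict_rank.zip result_rank).foldl
    (fun acc pr =>
      let row := rowA pr
      (acc.1 ++ [row.1], acc.2 ++ [row.2])) ([], [])

-- ===== PORT B =====
-- B's single inner pass: dispatch each position into six buckets (if/elif chain)
def loopB : List (Int × Int) → List Int → List Int → List Int → List Int → List Int → List Int → Int →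
    (List Int × List Int × List Int) × (List Int × List Int × List Int)
  | [], b1, b2, b3, c1, c2, c3, _ => ((b1, b2, b3), (c1, c2, c3))
  | (p, r) :: t, b1, b2, b3, c1, c2, c3, c =>
      let pos := c + 1
      let pb := if p = 1 then (b1 ++ [pos], b2, b3)
                else if p = 2 then (b1, b2 ++ [pos], b3)
                else if p = 3 then (b1, b2, b3 ++ [pos])
                else (b1, b2, b3)
      let rb := if r = 1 then (c1 ++ [pos], c2, c3)
                else if r = 2 then (c1, c2 ++ [pos], c3)
                else if r = 3 then (c1, c2, c3 ++ [pos])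
                else (c1, c2, c3)
      loopB t pb.1 pb.2.1 pb.2.2 rb.1 rb.2.1 rb.2.2 (c + 1)

def rowB (pr : List Int × List Int) : List Int × List Int :=
  let s := loopB (pr.1.zip pr.2) [] [] [] [] [] [] 0
  (s.1.1 ++ s.1.2.1 ++ s.1.2.2, s.2.1 ++ s.2.2.1 ++ s.2.2.2)

def soted_rank_alt (predict_rank : List (List Int)) (result_rank : List (List Int)) : List (List Int) × List (List Int) :=
  (predict_rank.zip result_rank).foldl
    (fun acc pr =>
      let row := rowB pr
      (acc.1 ++ [row.1], acc.2 ++ [row.2])) ([], [])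

-- ===== PRECONDITION & SPEC =====
def Spec_soted_rank (predict_rank : List (List Int)) (result_rank : List (List Int)) (out : List (List Int) × List (List Int)) : Prop := out = soted_rank_alt predict_rank result_rank
instance (predict_rank : List (List Int)) (result_rank : List (List Int)) (out : List (List Int) × List (List Int)) : Decidable (Spec_soted_rank predict_rank result_rank out) := by unfold Spec_soted_rank; infer_instance

-- ===== CLAIM (what is proved, stated in full; the proofs are below) =====
def Claim_equal_soted_rank : Prop := ∀ (predict_rank : List (List Int)) (result_rank : List (List Int)), Dom_soted_rank predict_rank result_rank → Spec_soted_rank predict_rank result_rank (soted_rank predict_rank result_rank)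

-- ===== LEMMAS AND PROOFS =====

-- positions (count+1) of entries of z whose projection equals v, starting counter c
def sel (v : Int) (proj : Int × Int → Int) : List (Int × Int) → Int → List Int
  | [], _ => []
  | x :: t, c => (if proj x = v then [c + 1] else []) ++ sel v proj t (c + 1)

theorem loopA_eq (v : Int) (z : List (Int × Int)) : ∀ (pred res : List Int) (c : Int),
    loopA v z pred res c = (pred ++ sel v Prod.fst z c, res ++ sel v Prod.snd z c) := by
  induction z with
  | nil => intro pred res c; simp [loopA, sel]
  | cons x t ih =>
    intro pred res c
    obtain ⟨p, r⟩ := x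
    simp only [loopA, sel, ih]
    split_ifs <;> simp_all [List.append_assoc]

theorem loopB_eq (z : List (Int × Int)) : ∀ (b1 b2 b3 c1 c2 c3 : List Int) (c : Int),
    loopB z b1 b2 b3 c1 c2 c3 c =
      ((b1 ++ sel 1 Prod.fst z c, b2 ++ sel 2 Prod.fst z c, b3 ++ sel 3 Prod.fst z c),
       (c1 ++ sel 1 Prod.snd z c, c2 ++ sel 2 Prod.snd z c, c3 ++ sel 3 Prod.snd z c)) := by
  induction z with
  | nil => intro b1 b2 b3 c1 c2 c3 c; simp [loopB, sel]
  | cons x t ih =>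
    intro b1 b2 b3 c1 c2 c3 c
    obtain ⟨p, r⟩ := x
    simp only [loopB, sel, ih]
    split_ifs <;> simp_all [List.append_assoc]

theorem row_eq (pr : List Int × List Int) : rowA pr = rowB pr := by
  simp [rowA, rowB, loopA_eq, loopB_eq, List.append_assoc]

-- ===== VERDICT (by name: the statement is the Claim_ definition above) =====
theorem soted_rank_spec : Claim_equal_soted_rank := by
  intro predict_rank result_rank _
  unfold Spec_soted_rank soted_rank soted_rank_alt
  have hf : (fun (acc : List (List Int) × List (List Int)) pr =>
      let row := rowA pr; (acc.1 ++ [row.1], acc.2 ++ [row.2])) =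
    (fun (acc : List (List Int) × List (List Int)) pr =>
      let row := rowB pr; (acc.1 ++ [row.1], acc.2 ++ [row.2])) := by
    funext acc pr; simp [row_eq]
  rw [hf]
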